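-- pv_equiv track=rewrite | github.com/bmuralid/Pure-Fortran | xp2cpp.py | tuple_inner_types
-- ===== SOURCE A (Python) =====
-- def tuple_inner_types(cpp_type: str) -> list[str] | None:
--     if not cpp_type.startswith("std::tuple<") or not cpp_type.endswith(">"):
--         return None
--     inner = cpp_type[len("std::tuple<"):-1]
--     parts: list[str] = []
--     current = []
--     depth = 0
--     for ch in inner:
--         if ch == "<":
--             depth += 1
--         elif ch == ">":
--             depth -= 1
--         if ch == "," and depth == 0:
--             parts.append("".join(current).strip())
--             current = []
--             continue
--         current.append(ch)
--     if current:
--         parts.append("".join(current).strip())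
--     return parts
-- ===== SOURCE B (Python) =====
-- def tuple_inner_types(cpp_type: str) -> list[str] | None:
--     if not cpp_type.startswith("std::tuple<") or not cpp_type.endswith(">"):
--         return None
--     inner = cpp_type[len("std::tuple<"):-1]
--     # pass 1: record the indices of all top-level commas
--     depth = 0
--     bounds = []
--     for i, ch in enumerate(inner):
--         if ch == "<":
--             depth += 1
--         elif ch == ">":
--             depth -= 1
--         if ch == "," and depth == 0:
--             bounds.append(i)
--     # pass 2: slice between consecutive boundaries
--     parts = []
--     start = 0
--     for b in bounds:
--         parts.append(inner[start:b].strip())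
--         start = b + 1
--     if inner[start:]:
--         parts.append(inner[start:].strip())
--     return parts
-- ===== Notes on version B (the rewrite author's own statement) =====
-- stated objective: alternative
-- what changed: B replaces A's single-pass character-accumulator buffer with a two-pass scheme: first a depth-tracking scan that records the indices of top-level commas, then a second pass slicing and stripping the pieces between consecutive boundaries.
import Mathlib
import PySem

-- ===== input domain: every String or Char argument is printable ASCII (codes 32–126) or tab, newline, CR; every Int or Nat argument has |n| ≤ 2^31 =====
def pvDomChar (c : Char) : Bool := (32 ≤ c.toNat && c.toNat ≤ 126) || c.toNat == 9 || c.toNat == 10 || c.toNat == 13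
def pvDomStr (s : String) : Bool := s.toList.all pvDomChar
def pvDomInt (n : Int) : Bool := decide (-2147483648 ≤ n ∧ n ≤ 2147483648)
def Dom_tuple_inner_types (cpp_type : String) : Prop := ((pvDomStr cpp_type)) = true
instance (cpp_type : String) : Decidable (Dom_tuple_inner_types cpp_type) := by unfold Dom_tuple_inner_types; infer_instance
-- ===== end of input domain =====

-- B replaces A's character-accumulator buffer with a two-pass scheme (boundary-index table, then slicing); alternative decomposition, same cost.

-- ===== PORT A =====
-- the character loop of A: state (parts, current buffer, depth)
def pvFoldA (cs : List Char) (parts : List String) (current : List Char) (depth : Int) : List String :=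
  match cs with
  | [] => if current ≠ [] then parts ++ [String.ofList (PySem.Chars.strip current)] else parts
  | ch :: rest =>
    let depth' := if ch = '<' then depth + 1 else if ch = '>' then depth - 1 else depth
    if ch = ',' ∧ depth' = 0 then
      pvFoldA rest (parts ++ [String.ofList (PySem.Chars.strip current)]) [] depth'
    else
      pvFoldA rest parts (current ++ [ch]) depth'

def tuple_inner_types (cpp_type : String) : Option (List String) :=
  if !(PySem.Str.startswith cpp_type "std::tuple<") || !(PySem.Str.endswith cpp_type ">") then
    none
  else
    let inner := PySem.List.slice cpp_type.toList (some 11) (some (-1))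
    some (pvFoldA inner [] [] 0)

-- ===== PORT B =====
-- pass 1 of B: indices of the top-level commas
def pvBoundsB (cs : List Char) (i : Nat) (depth : Int) (acc : List Nat) : List Nat :=
  match cs with
  | [] => acc
  | ch :: rest =>
    let depth' := if ch = '<' then depth + 1 else if ch = '>' then depth - 1 else depth
    let acc' := if ch = ',' ∧ depth' = 0 then acc ++ [i] else acc
    pvBoundsB rest (i + 1) depth' acc'

-- pass 2 of B: slice between consecutive boundaries
def pvPiecesB (inner : List Char) (bs : List Nat) (start : Nat) (parts : List String) : List String :=
  match bs with
  | [] =>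
    let tail := PySem.List.slice inner (some (start : Int)) none
    if tail ≠ [] then parts ++ [String.ofList (PySem.Chars.strip tail)] else parts
  | b :: rest =>
    pvPiecesB inner rest (b + 1)
      (parts ++ [String.ofList (PySem.Chars.strip (PySem.List.slice inner (some (start : Int)) (some (b : Int))))])

def tuple_inner_types_alt (cpp_type : String) : Option (List String) :=
  if !(PySem.Str.startswith cpp_type "std::tuple<") || !(PySem.Str.endswith cpp_type ">") then
    none
  else
    let inner := PySem.List.slice cpp_type.toList (some 11) (some (-1))
    some (pvPiecesB inner (pvBoundsB inner 0 0 []) 0 [])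

-- ===== PRECONDITION & SPEC =====
def Spec_tuple_inner_types (cpp_type : String) (out : Option (List String)) : Prop := out = tuple_inner_types_alt cpp_type
instance (cpp_type : String) (out : Option (List String)) : Decidable (Spec_tuple_inner_types cpp_type out) := by unfold Spec_tuple_inner_types; infer_instance

-- ===== CLAIM (what is proved, stated in full; the proofs are below) =====
def Claim_equal_tuple_inner_types : Prop := ∀ (cpp_type : String), Dom_tuple_inner_types cpp_type → Spec_tuple_inner_types cpp_type (tuple_inner_types cpp_type)

-- ===== LEMMAS AND PROOFS =====

theorem pvBoundsB_acc (cs : List Char) (i : Nat) (depth : Int) (acc : List Nat) :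
    pvBoundsB cs i depth acc = acc ++ pvBoundsB cs i depth [] := by
  induction cs generalizing i depth acc with
  | nil => simp [pvBoundsB]
  | cons ch rest ih =>
    simp only [pvBoundsB]
    generalize (if ch = '<' then depth + 1 else if ch = '>' then depth - 1 else depth) = d'
    by_cases hc : ch = ',' ∧ d' = 0
    · rw [if_pos hc, if_pos hc, ih _ _ (acc ++ [i]), ih _ _ ([] ++ [i])]; simp
    · rw [if_neg hc, if_neg hc, ih _ _ acc]

theorem pvFoldA_eq_pvPiecesB (cs inner : List Char) (i : Nat) (depth : Int)
    (parts : List String) (current : List Char) (start : Nat)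
    (h1 : i = start + current.length)
    (h2 : inner.drop start = current ++ cs) :
    pvFoldA cs parts current depth = pvPiecesB inner (pvBoundsB cs i depth []) start parts := by
  induction cs generalizing i depth parts current start with
  | nil =>
    simp only [pvFoldA, pvBoundsB, pvPiecesB, PySem.List.slice_from_natCast]
    rw [h2]
    simp
  | cons ch rest ih =>
    simp only [pvFoldA, pvBoundsB]
    generalize (if ch = '<' then depth + 1 else if ch = '>' then depth - 1 else depth) = d'
    by_cases hc : ch = ',' ∧ d' = 0
    · rw [if_pos hc, if_pos hc, pvBoundsB_acc rest (i + 1) d' ([] ++ [i])]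
      simp only [List.nil_append, List.singleton_append, pvPiecesB]
      have hslice : PySem.List.slice inner (some (start : Int)) (some (i : Int)) = current := by
        rw [PySem.List.slice_natCast, h2, h1]
        simp
      rw [hslice]
      refine ih (i + 1) _ _ [] (i + 1) (by simp) ?_
      have hd : (inner.drop start).drop (current.length + 1) = inner.drop (i + 1) := by
        rw [List.drop_drop]; congr 1; omega
      rw [h2] at hd
      have hrest : (current ++ ch :: rest).drop (current.length + 1) = rest := by
        rw [show current ++ ch :: rest = (current ++ [ch]) ++ rest by simp,
            show current.length + 1 = (current ++ [ch]).length by simp]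
        exact List.drop_left
      rw [hrest] at hd
      simpa using hd.symm
    · rw [if_neg hc, if_neg hc]
      exact ih (i + 1) _ parts (current ++ [ch]) start (by simp; omega) (by simp [h2])

-- ===== VERDICT (by name: the statement is the Claim_ definition above) =====
theorem tuple_inner_types_spec : Claim_equal_tuple_inner_types := by
  intro cpp_type _
  unfold Spec_tuple_inner_types tuple_inner_types tuple_inner_types_alt
  split_ifs with hg
  · rfl
  · exact congrArg some (pvFoldA_eq_pvPiecesB _ _ 0 0 [] [] 0 (by simp) (by simp))
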